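-- pv_equiv track=rewrite | github.com/AlexisOMG/fuzzy-search | win_2.py | create_fingerprints
-- ===== SOURCE A (Python) =====
-- from typing import List, Tuple, Dict
--
-- def create_fingerprints(hashes: List[int], window_size: int) -> List[int]:
--     # Создание слепков
--     fingerprints = []
--     for i in range(len(hashes) - window_size + 1):
--         window = hashes[i:i + window_size]
--         min_hash = min(window)
--         if not fingerprints or fingerprints[-1] != min_hash:
--             fingerprints.append(min_hash)
--     return fingerprints
-- ===== SOURCE B (Python) =====
-- def create_fingerprints(hashes, window_size):
--     # Monotonic-deque sliding-window minimum, O(n); dedup consecutive minima.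
--     fingerprints = []
--     dq = []        # indices into hashes; dq[head:] is the deque, values strictly increasing
--     head = 0       # front pointer (oldest live index)
--     for i in range(len(hashes)):
--         h = hashes[i]
--         while len(dq) > head and hashes[dq[-1]] >= h:
--             dq.pop()
--         dq.append(i)
--         if dq[head] <= i - window_size:
--             head += 1
--         if i >= window_size - 1:
--             m = hashes[dq[head]]
--             if not fingerprints or fingerprints[-1] != m:
--                 fingerprints.append(m)
--     return fingerprints
-- ===== Notes on version B (the rewrite author's own statement) =====
-- stated objective: faster
-- what changed: Replaces A's per-window min() scan over every length-w slice by a single-pass monotonic-deque sliding-window minimum (indices kept value-increasing, expired front popped, one amortized push/pop per element), with the same dedup-consecutive output.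
import Mathlib
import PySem

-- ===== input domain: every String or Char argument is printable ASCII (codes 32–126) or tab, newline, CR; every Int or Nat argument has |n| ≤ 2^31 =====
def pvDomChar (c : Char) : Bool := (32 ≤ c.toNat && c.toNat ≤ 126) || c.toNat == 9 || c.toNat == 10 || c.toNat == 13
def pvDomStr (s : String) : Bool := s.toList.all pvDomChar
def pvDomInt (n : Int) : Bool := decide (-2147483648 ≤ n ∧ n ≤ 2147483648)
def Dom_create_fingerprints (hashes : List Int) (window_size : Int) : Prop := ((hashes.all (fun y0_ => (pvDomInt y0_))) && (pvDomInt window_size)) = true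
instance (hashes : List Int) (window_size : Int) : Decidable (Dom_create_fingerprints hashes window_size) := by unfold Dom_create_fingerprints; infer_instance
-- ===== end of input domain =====

-- B replaces A's per-window min scan by a monotonic-deque sliding-window minimum
-- with consecutive deduplication; objective: faster.

-- ===== PORT A =====
def create_fingerprints (hashes : List Int) (window_size : Int) : List Int :=
  (PySem.List.pyRange 0 ((hashes.length : Int) - window_size + 1) 1).foldl
    (fun fps i =>
      let window := PySem.List.slice hashes (some i) (some (i + window_size))
      match PySem.List.min? window (fun x => x) with
      | some min_hash =>
          if fps = [] ∨ fps.getLast? ≠ some min_hash then fps ++ [min_hash] else fps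
      | none => fps)   -- min([]) raises ValueError in Python: excluded by Pre_
    []

-- ===== PORT B =====
-- Source B keeps the deque as a list of (index, value) pairs plus a head pointer; here
-- the live deque dq[head:] is kept directly as a list with NEWEST pair first (so
-- Source B's pop from the back is dropWhile at the front, and its popleft / front reads
-- are dropLast / getLast).
def cfAltLoop (w : Int) : List (Int × Int) → List (Int × Int) → List Int → List Int
  | [], _dq, fps => fps.reverse
  | (i, h) :: rest, dq, fps =>
    let d1 := dq.dropWhile (fun p => decide (h ≤ p.2))   -- while dq[-1][1] >= h: pop
    let d2 := (i, h) :: d1                               -- append (i, h)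
    let d3 := if (d2.getLastD (0, 0)).1 ≤ i - w then d2.dropLast else d2  -- expire front
    let fps' := if w - 1 ≤ i then
        (let m := (d3.getLastD (0, 0)).2
         if fps = [] ∨ fps.head? ≠ some m then m :: fps else fps)
      else fps
    cfAltLoop w rest d3 fps'

def create_fingerprints_alt (hashes : List Int) (window_size : Int) : List Int :=
  cfAltLoop window_size (PySem.List.enumerate hashes 0) [] []

-- ===== PRECONDITION & SPEC =====
-- Pre_ excludes exactly window_size ≤ 0, where Python A raises ValueError (min of
-- an empty slice); A returns normally on every input with window_size ≥ 1.
def Pre_create_fingerprints (hashes : List Int) (window_size : Int) : Prop :=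
  1 ≤ window_size
instance (hashes : List Int) (window_size : Int) : Decidable (Pre_create_fingerprints hashes window_size) := by unfold Pre_create_fingerprints; infer_instance

def pvWitness_create_fingerprints : List Int × Int := ([3, 1, 2, 1, 5], 2)

def Spec_create_fingerprints (hashes : List Int) (window_size : Int) (out : List Int) : Prop := out = create_fingerprints_alt hashes window_size
instance (hashes : List Int) (window_size : Int) (out : List Int) : Decidable (Spec_create_fingerprints hashes window_size out) := by unfold Spec_create_fingerprints; infer_instance

-- ===== CLAIM (what is proved, stated in full; the proofs are below) =====
def Claim_equal_create_fingerprints : Prop := ∀ (hashes : List Int) (window_size : Int), Dom_create_fingerprints hashes window_size → Pre_create_fingerprints hashes window_size → Spec_create_fingerprints hashes window_size (create_fingerprints hashes window_size)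

-- ===== LEMMAS AND PROOFS =====

def pvRecs : Option Int → List (Int × Int) → List (Int × Int)
  | _, [] => []
  | none, (j, v) :: rest => (j, v) :: pvRecs (some v) rest
  | some mv, (j, v) :: rest =>
    if v < mv then (j, v) :: pvRecs (some v) rest else pvRecs (some mv) rest

def pvMinOpt (m : Option Int) (v : Int) : Option Int :=
  some (match m with | none => v | some r => min r v)

def pvRunMin (m : Option Int) (l : List (Int × Int)) : Option Int :=
  l.foldl (fun a p => pvMinOpt a p.2) m

theorem pvRecs_sub {m : Option Int} {l : List (Int × Int)} {p : Int × Int}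
    (h : p ∈ pvRecs m l) : p ∈ l := by
  induction l generalizing m with
  | nil => simp [pvRecs] at h
  | cons q rest ih =>
    obtain ⟨j, v⟩ := q
    cases m with
    | none =>
      simp [pvRecs] at h
      rcases h with h | h
      · simp [h]
      · exact List.mem_cons_of_mem _ (ih h)
    | some mv =>
      simp only [pvRecs] at h
      split at h
      · rcases List.mem_cons.1 h with h | h
        · simp [h]
        · exact List.mem_cons_of_mem _ (ih h)
      · exact List.mem_cons_of_mem _ (ih h)

theorem dropWhile_dropWhile {α : Type} (p q : α → Bool) (l : List α)
    (h : ∀ x, q x = true → p x = true) :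
    (l.dropWhile q).dropWhile p = l.dropWhile p := by
  induction l with
  | nil => simp
  | cons a t ih =>
    by_cases hq : q a = true
    · rw [List.dropWhile_cons_of_pos hq, ih, List.dropWhile_cons_of_pos (h a hq)]
    · rw [List.dropWhile_cons_of_neg hq]

theorem pvRecs_some_eq_dropWhile (m : Int) (l : List (Int × Int)) :
    pvRecs (some m) l = (pvRecs none l).dropWhile (fun p => decide (m ≤ p.2)) := by
  induction l generalizing m with
  | nil => simp [pvRecs]
  | cons q rest ih =>
    obtain ⟨j, v⟩ := q
    by_cases hv : v < m
    · simp only [pvRecs, if_pos hv]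
      rw [List.dropWhile_cons_of_neg (by simp; omega)]
    · simp only [pvRecs, if_neg hv]
      rw [List.dropWhile_cons_of_pos (by simp; omega), ih m, ih v,
        dropWhile_dropWhile]
      intro x hx
      simp at hx ⊢
      omega


theorem pvRunMin_cons (m : Option Int) (q : Int × Int) (l : List (Int × Int)) :
    pvRunMin m (q :: l) = pvRunMin (pvMinOpt m q.2) l := rfl

theorem pvRecs_snoc (m : Option Int) (l : List (Int × Int)) (x : Int × Int) :
    pvRecs m (l ++ [x]) = pvRecs m l ++
      (if (match pvRunMin m l with | none => true | some r => decide (x.2 < r)) = true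
       then [x] else []) := by
  induction l generalizing m with
  | nil =>
    cases m with
    | none => simp [pvRecs, pvRunMin]
    | some mv =>
      by_cases h : x.2 < mv <;> simp [pvRecs, pvRunMin, h]
  | cons q rest ih =>
    obtain ⟨j, v⟩ := q
    cases m with
    | none =>
      simp only [List.cons_append, pvRecs, ih (some v), pvRunMin_cons]
      simp [pvMinOpt]
    | some mv =>
      by_cases hv : v < mv
      · simp only [List.cons_append, pvRecs, if_pos hv, ih (some v), pvRunMin_cons]
        have : pvMinOpt (some mv) v = some v := by simp [pvMinOpt]; omega
        simp [this]
      · simp only [List.cons_append, pvRecs, if_neg hv, ih (some mv), pvRunMin_cons]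
        have : pvMinOpt (some mv) v = some mv := by simp [pvMinOpt]; omega
        simp [this]

theorem pvRunMin_isMin {l : List (Int × Int)} {m : Option Int} {r : Int}
    (hr : pvRunMin m l = some r) :
    (∀ p ∈ l, r ≤ p.2) ∧ (∀ a, m = some a → r ≤ a) := by
  induction l generalizing m with
  | nil => exact ⟨by simp, fun a ha => by simp [pvRunMin, ha] at hr; omega⟩
  | cons q rest ih =>
    rw [pvRunMin_cons] at hr
    obtain ⟨h1, h2⟩ := ih hr
    have hq : r ≤ q.2 := by
      cases m with
      | none => exact h2 q.2 rfl
      | some a =>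
        have := h2 (min a q.2) (by simp [pvMinOpt])
        omega
    refine ⟨fun p hp => ?_, fun a ha => ?_⟩
    · rcases List.mem_cons.1 hp with h | h
      · rw [h]; exact hq
      · exact h1 p h
    · subst ha
      have := h2 (min a q.2) (by simp [pvMinOpt])
      omega

theorem pvRecs_getLast (m : Option Int) (l : List (Int × Int)) :
    (match (pvRecs m l).getLast? with | some p => some p.2 | none => m) = pvRunMin m l := by
  induction l generalizing m with
  | nil => simp [pvRecs, pvRunMin]
  | cons q rest ih =>
    obtain ⟨j, v⟩ := q
    have hcons : ∀ (X : List (Int × Int)),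
        ((j, v) :: X).getLast? = match X.getLast? with | some p => some p | none => some (j, v) := by
      intro X
      cases hX : X.getLast? with
      | none => simp [List.getLast?_eq_none_iff.1 hX]
      | some p =>
        rcases List.getLast?_eq_some_iff.1 hX with ⟨Y, hY⟩
        rw [hY, show (j, v) :: (Y ++ [p]) = ((j, v) :: Y) ++ [p] by simp,
          List.getLast?_append_of_ne_nil, List.getLast?_singleton]
        simp
    cases m with
    | none =>
      rw [pvRunMin_cons]
      have : pvMinOpt none v = some v := rfl
      rw [this, ← ih (some v)]
      simp only [pvRecs, hcons]
      cases (pvRecs (some v) rest).getLast? <;> simp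
    | some mv =>
      by_cases hv : v < mv
      · rw [pvRunMin_cons]
        have hmv : pvMinOpt (some mv) v = some v := by simp [pvMinOpt]; omega
        rw [hmv, ← ih (some v)]
        simp only [pvRecs, if_pos hv, hcons]
        cases (pvRecs (some v) rest).getLast? <;> simp
      · rw [pvRunMin_cons]
        have hmv : pvMinOpt (some mv) v = some mv := by simp [pvMinOpt]; omega
        rw [hmv, ← ih (some mv)]
        simp [pvRecs, if_neg hv]

theorem pvRunMin_some (a : Int) (l : List (Int × Int)) :
    pvRunMin (some a) l = some ((l.map Prod.snd).foldl min a) := by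
  induction l generalizing a with
  | nil => simp [pvRunMin]
  | cons q rest ih => rw [pvRunMin_cons]; simp [pvMinOpt, ih]

theorem foldl_min_pull (t : List Int) (a x : Int) :
    t.foldl min (min a x) = min (t.foldl min a) x := by
  induction t generalizing a with
  | nil => simp
  | cons b rest ih =>
    simp only [List.foldl_cons]
    rw [show min (min a x) b = min (min a b) x by omega, ih]

theorem getLastD_cons_mem (a : Int × Int) (l : List (Int × Int)) :
    (a :: l).getLastD (0, 0) ∈ a :: l := by
  rw [List.getLastD_eq_getLast?]
  cases h : (a :: l).getLast? with
  | none => simp at h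
  | some p =>
    have := List.mem_of_getLast? h
    simpa using this

theorem pvGetLast?_cons_append (a x : Int × Int) (l : List (Int × Int)) :
    (a :: (l ++ [x])).getLast? = some x := by
  rw [← List.cons_append]
  exact List.getLast?_concat

theorem pvDropLast_cons_append (a x : Int × Int) (l : List (Int × Int)) :
    (a :: (l ++ [x])).dropLast = a :: l := by
  rw [← List.cons_append]
  rw [List.dropLast_concat]

def pvStep (e c v : Int) (D : List (Int × Int)) : List (Int × Int) :=
  if (((c, v) :: D.dropWhile (fun p => decide (v ≤ p.2))).getLastD (0, 0)).1 ≤ e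
  then ((c, v) :: D.dropWhile (fun p => decide (v ≤ p.2))).dropLast
  else (c, v) :: D.dropWhile (fun p => decide (v ≤ p.2))

theorem pvStep_grow (W : List (Int × Int)) (c v e : Int)
    (hIdx : ∀ p ∈ W, e < p.1) (hc : e < c) :
    pvStep e c v (pvRecs none W) = pvRecs none ((c, v) :: W) := by
  unfold pvStep
  set d1 := (pvRecs none W).dropWhile (fun p => decide (v ≤ p.2)) with hd1
  have hmem : ((c, v) :: d1).getLastD (0, 0) ∈ (c, v) :: d1 := getLastD_cons_mem _ _
  have hgt : e < (((c, v) :: d1).getLastD (0, 0)).1 := by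
    rcases List.mem_cons.1 hmem with h | h
    · rw [h]; exact hc
    · exact hIdx _ (pvRecs_sub ((List.dropWhile_sublist _).subset (hd1 ▸ h)))
  rw [if_neg (by omega)]
  show (c, v) :: d1 = pvRecs none ((c, v) :: W)
  rw [show pvRecs none ((c, v) :: W) = (c, v) :: pvRecs (some v) W from rfl,
    pvRecs_some_eq_dropWhile, hd1]

theorem pvStep_slide (W'' : List (Int × Int)) (x : Int × Int) (c v e : Int)
    (hIdx : ∀ p ∈ W'', e < p.1) (hx : x.1 = e) (hc : e < c) :
    pvStep e c v (pvRecs none (W'' ++ [x])) = pvRecs none ((c, v) :: W'') := by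
  unfold pvStep
  have hRHS : pvRecs none ((c, v) :: W'') =
      (c, v) :: (pvRecs none W'').dropWhile (fun p => decide (v ≤ p.2)) := by
    rw [show pvRecs none ((c, v) :: W'') = (c, v) :: pvRecs (some v) W'' from rfl,
      pvRecs_some_eq_dropWhile]
  rw [pvRecs_snoc]
  by_cases hkeep : (match pvRunMin none W'' with | none => true | some r => decide (x.2 < r)) = true
  · rw [if_pos hkeep]
    by_cases hv : x.2 < v
    · -- x survives the dropWhile; it is the last element and gets expired
      have hdw : (pvRecs none W'' ++ [x]).dropWhile (fun p => decide (v ≤ p.2)) =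
          (pvRecs none W'').dropWhile (fun p => decide (v ≤ p.2)) ++ [x] := by
        rw [List.dropWhile_append]
        split
        · next hemp =>
            simp only [List.isEmpty_iff] at hemp
            rw [hemp, List.dropWhile_cons_of_neg (by simp; omega)]
            simp
        · rfl
      rw [hdw]
      rw [if_pos (by
          rw [List.getLastD_eq_getLast?, pvGetLast?_cons_append]
          simp [hx]),
        pvDropLast_cons_append]
      exact hRHS.symm
    · -- v ≤ x.2 < every record value: everything is dropped
      have hall : ∀ p ∈ pvRecs none W'', v ≤ p.2 := by
        intro p hp
        cases hrm : pvRunMin none W'' with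
        | none =>
          -- W'' = [] so no records
          cases W'' with
          | nil => simp [pvRecs] at hp
          | cons q rest => rw [pvRunMin_cons] at hrm; simp [pvMinOpt, pvRunMin_some] at hrm
        | some r =>
          rw [hrm] at hkeep
          simp at hkeep
          have := (pvRunMin_isMin hrm).1 p (pvRecs_sub hp)
          omega
      have hd1 : (pvRecs none W'' ++ [x]).dropWhile (fun p => decide (v ≤ p.2)) = [] := by
        rw [List.dropWhile_eq_nil_iff]
        intro p hp
        rcases List.mem_append.1 hp with h | h
        · simpa using hall p h
        · simp at h; simp [h]; omega
      have hd1' : (pvRecs none W'').dropWhile (fun p => decide (v ≤ p.2)) = [] := by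
        rw [List.dropWhile_eq_nil_iff]; intro p hp; simpa using hall p hp
      rw [hd1, if_neg (by simp; omega), hRHS, hd1']
  · rw [if_neg hkeep]
    simp only [List.append_nil]
    set d1 := (pvRecs none W'').dropWhile (fun p => decide (v ≤ p.2)) with hd1
    have hmem : ((c, v) :: d1).getLastD (0, 0) ∈ (c, v) :: d1 := getLastD_cons_mem _ _
    have hgt : e < (((c, v) :: d1).getLastD (0, 0)).1 := by
      rcases List.mem_cons.1 hmem with h | h
      · rw [h]; exact hc
      · exact hIdx _ (pvRecs_sub ((List.dropWhile_sublist _).subset (hd1 ▸ h)))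
    rw [if_neg (by omega), hRHS]

-- ---- windows over the enumerated list ----

def pvE (hs : List Int) : List (Int × Int) := PySem.List.enumerate hs 0

theorem pvEnum_getElem? (hs : List Int) (s : Int) (k : Nat) :
    (PySem.List.enumerate hs s)[k]? = (hs[k]?).map (fun v => (s + k, v)) := by
  induction hs generalizing s k with
  | nil => simp [PySem.List.enumerate]
  | cons x rest ih =>
    rw [PySem.List.enumerate_cons]
    cases k with
    | zero => simp
    | succ k =>
      simp only [List.getElem?_cons_succ]
      rw [ih (s + 1) k]
      have h : s + 1 + (k : Int) = s + ((k + 1 : Nat) : Int) := by push_cast; ring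
      simp only [h]

theorem pvEnum_map_snd (hs : List Int) (s : Int) :
    (PySem.List.enumerate hs s).map Prod.snd = hs := by
  induction hs generalizing s with
  | nil => simp [PySem.List.enumerate]
  | cons x rest ih => rw [PySem.List.enumerate_cons]; simp [ih]

theorem pvE_getElem? (hs : List Int) (k : Nat) :
    (pvE hs)[k]? = (hs[k]?).map (fun v => ((k : Int), v)) := by
  unfold pvE
  rw [pvEnum_getElem?]
  simp

theorem pvE_map_snd (hs : List Int) : (pvE hs).map Prod.snd = hs := pvEnum_map_snd hs 0

theorem pvE_length (hs : List Int) : (pvE hs).length = hs.length :=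
  PySem.List.length_enumerate hs 0

def pvW (hs : List Int) (w : Int) (t : Nat) : List (Int × Int) :=
  ((pvE hs).take t).drop (t - w.toNat)

theorem pvW_map_snd (hs : List Int) (w : Int) (t : Nat) :
    (pvW hs w t).map Prod.snd = ((hs.take t).drop (t - w.toNat)) := by
  unfold pvW
  rw [List.map_drop, List.map_take, pvE_map_snd]

theorem pvW_getElem? (hs : List Int) (w : Int) (t r : Nat) (hr : t - w.toNat + r < t) :
    (pvW hs w t)[r]? = (hs[t - w.toNat + r]?).map (fun v => (((t - w.toNat + r : Nat) : Int), v)) := by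
  unfold pvW
  rw [List.getElem?_drop, List.getElem?_take_of_lt (by omega), pvE_getElem?]

theorem pvW_length (hs : List Int) (w : Int) (t : Nat) (ht : t ≤ hs.length) :
    (pvW hs w t).length = t - (t - w.toNat) := by
  unfold pvW
  rw [List.length_drop, List.length_take, pvE_length]
  omega

theorem pvW_mem_idx (hs : List Int) (w : Int) (t : Nat) (ht : t ≤ hs.length)
    {p : Int × Int} (hp : p ∈ pvW hs w t) :
    ((t - w.toNat : Nat) : Int) ≤ p.1 ∧ p.1 < (t : Int) := by
  rcases List.mem_iff_getElem.1 hp with ⟨r, hrl, hr⟩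
  rw [pvW_length hs w t ht] at hrl
  have h1 : (pvW hs w t)[r]? = some p := by
    rw [List.getElem?_eq_getElem (by rw [pvW_length hs w t ht]; omega), hr]
  rw [pvW_getElem? hs w t r (by omega)] at h1
  cases h2 : hs[t - w.toNat + r]? with
  | none => rw [h2] at h1; simp at h1
  | some v =>
    rw [h2] at h1
    simp at h1
    rw [← h1]
    refine ⟨by simp, by simp; omega⟩

theorem pvW_tail_idx (hs : List Int) (w : Int) (t : Nat) (ht : t ≤ hs.length)
    {p : Int × Int} (hp : p ∈ (pvW hs w t).tail) :
    ((t - w.toNat : Nat) : Int) < p.1 := by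
  rcases List.mem_iff_getElem.1 hp with ⟨r, hrl, hr⟩
  rw [List.length_tail, pvW_length hs w t ht] at hrl
  have h1 : (pvW hs w t)[r + 1]? = some p := by
    rw [← List.getElem?_tail,
      List.getElem?_eq_getElem (by rw [List.length_tail, pvW_length hs w t ht]; omega), hr]
  rw [pvW_getElem? hs w t (r + 1) (by omega)] at h1
  cases h2 : hs[t - w.toNat + (r + 1)]? with
  | none => rw [h2] at h1; simp at h1
  | some v =>
    rw [h2] at h1
    simp at h1
    rw [← h1]
    simp

theorem pvW_head_idx (hs : List Int) (w : Int) (t : Nat) (ht : t ≤ hs.length)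
    (hne : pvW hs w t ≠ []) :
    ((pvW hs w t).head hne).1 = ((t - w.toNat : Nat) : Int) := by
  have h1 : (pvW hs w t)[0]? = some ((pvW hs w t).head hne) := by
    rw [List.getElem?_eq_getElem (List.length_pos_iff.2 hne), List.getElem_zero]
  have hlen : 0 < (pvW hs w t).length := List.length_pos_iff.2 hne
  rw [pvW_length hs w t ht] at hlen
  rw [pvW_getElem? hs w t 0 (by omega)] at h1
  cases h2 : hs[t - w.toNat + 0]? with
  | none => rw [h2] at h1; simp at h1
  | some v =>
    rw [h2] at h1
    simp at h1
    rw [← h1]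

-- ---- window evolution ----

theorem pvW_succ_grow (hs : List Int) (w : Int) (t : Nat) (ht : t < hs.length)
    (hlt : t + 1 ≤ w.toNat) :
    pvW hs w (t + 1) = pvW hs w t ++ ((pvE hs)[t]?).toList := by
  unfold pvW
  rw [show t + 1 - w.toNat = 0 by omega, show t - w.toNat = 0 by omega]
  simp only [List.drop_zero]
  rw [List.take_succ]

theorem pvW_succ_slide (hs : List Int) (w : Int) (t : Nat) (hw : 1 ≤ w) (ht : t < hs.length)
    (hge : w.toNat ≤ t) :
    pvW hs w (t + 1) = (pvW hs w t).tail ++ ((pvE hs)[t]?).toList := by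
  unfold pvW
  rw [List.take_succ, show t + 1 - w.toNat = (t - w.toNat) + 1 by omega,
    List.drop_append_of_le_length (by rw [List.length_take, pvE_length]; omega)]
  congr 1
  rw [← List.drop_drop, List.drop_one]

-- ---- minima of windows ----

def pvFold : List Int → Int
  | [] => 0
  | x :: r => r.foldl min x

theorem pvFold_concat_ne (l : List Int) (x : Int) (h : l ≠ []) :
    pvFold (l ++ [x]) = min (pvFold l) x := by
  cases l with
  | nil => exact absurd rfl h
  | cons y r => simp [pvFold, List.foldl_append]

theorem pvFold_rev_aux (r : List Int) (x : Int) :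
    pvFold (r.reverse ++ [x]) = r.foldl min x := by
  induction r generalizing x with
  | nil => simp [pvFold]
  | cons y r' ih =>
    rw [List.reverse_cons, List.append_assoc, show ([y] ++ [x]) = [y] ++ [x] from rfl]
    rw [← List.append_assoc, pvFold_concat_ne _ _ (by simp), ih y]
    simp only [List.foldl_cons]
    rw [show min x y = min y x from min_comm x y, foldl_min_pull]

theorem pvFold_reverse (l : List Int) : pvFold l.reverse = pvFold l := by
  cases l with
  | nil => rfl
  | cons x r => rw [List.reverse_cons, pvFold_rev_aux]; rfl

theorem pvRunMin_none_eq (l : List (Int × Int)) (h : l ≠ []) :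
    pvRunMin none l = some (pvFold (l.map Prod.snd)) := by
  cases l with
  | nil => exact absurd rfl h
  | cons q rest =>
    rw [pvRunMin_cons, show pvMinOpt none q.2 = some q.2 from rfl, pvRunMin_some]
    rfl

def pvWinMin (hs : List Int) (w : Int) (i : Nat) : Int :=
  pvFold ((pvW hs w (i + 1)).map Prod.snd)

def pvMins (hs : List Int) (w : Int) (t : Nat) : List Int :=
  (List.range (t + 1 - w.toNat)).map (fun k => pvWinMin hs w (w.toNat - 1 + k))

def pvApp (acc : List Int) (m : Int) : List Int :=
  if acc = [] ∨ acc.getLast? ≠ some m then acc ++ [m] else acc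

def pvDedup (l : List Int) : List Int := l.foldl pvApp []

theorem pvMins_succ (hs : List Int) (w : Int) (t : Nat) (hw : 1 ≤ w) :
    pvMins hs w (t + 1) =
      pvMins hs w t ++ (if w.toNat ≤ t + 1 then [pvWinMin hs w t] else []) := by
  unfold pvMins
  by_cases h : w.toNat ≤ t + 1
  · rw [if_pos h, show t + 1 + 1 - w.toNat = (t + 1 - w.toNat) + 1 by omega,
      List.range_succ, List.map_append]
    simp only [List.map_cons, List.map_nil]
    rw [show w.toNat - 1 + (t + 1 - w.toNat) = t by omega]
  · rw [if_neg h, show t + 1 + 1 - w.toNat = t + 1 - w.toNat by omega, List.append_nil]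

theorem pvRevApp (L : List Int) (m : Int) :
    (if L.reverse = [] ∨ L.reverse.head? ≠ some m then m :: L.reverse else L.reverse)
    = (pvApp L m).reverse := by
  unfold pvApp
  have hiff : (L.reverse = [] ∨ L.reverse.head? ≠ some m) ↔ (L = [] ∨ L.getLast? ≠ some m) := by
    rw [List.head?_reverse]
    simp
  by_cases h : L = [] ∨ L.getLast? ≠ some m
  · rw [if_pos (hiff.2 h), if_pos h]
    simp
  · rw [if_neg (fun hc => h (hiff.1 hc)), if_neg h]

-- ---- the main loop invariant ----

theorem cfAltLoop_cons (w i h : Int) (rest dq : List (Int × Int)) (fps : List Int) :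
    cfAltLoop w ((i, h) :: rest) dq fps =
      cfAltLoop w rest (pvStep (i - w) i h dq)
        (if w - 1 ≤ i then
          (if fps = [] ∨ fps.head? ≠ some (((pvStep (i - w) i h dq).getLastD (0, 0)).2)
           then ((pvStep (i - w) i h dq).getLastD (0, 0)).2 :: fps else fps)
         else fps) := rfl

theorem pvLoopInv (hs : List Int) (w : Int) (hw : 1 ≤ w) :
    ∀ (k t : Nat), t + k = hs.length →
      cfAltLoop w ((pvE hs).drop t) (pvRecs none (pvW hs w t).reverse)
        ((pvDedup (pvMins hs w t)).reverse)
      = pvDedup (pvMins hs w hs.length) := by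
  intro k
  induction k with
  | zero =>
    intro t ht
    have hend : (pvE hs).drop t = [] := by
      rw [List.drop_eq_nil_iff, pvE_length]
      omega
    rw [hend, show t = hs.length by omega]
    show ((pvDedup (pvMins hs w hs.length)).reverse).reverse = _
    rw [List.reverse_reverse]
  | succ k ih =>
    intro t ht
    have htl : t < hs.length := by omega
    have hv : hs[t]? = some (hs[t]'htl) := List.getElem?_eq_getElem htl
    set v := hs[t]'htl with hvdef
    have hEt : (pvE hs)[t]? = some ((t : Int), v) := by
      rw [pvE_getElem?, hv]
      rfl
    have hdrop : (pvE hs).drop t = ((t : Int), v) :: (pvE hs).drop (t + 1) := by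
      rw [List.drop_eq_getElem_cons (by rw [pvE_length]; omega)]
      congr 1
      have := List.getElem?_eq_getElem (l := pvE hs) (i := t) (by rw [pvE_length]; omega)
      rw [hEt] at this
      exact (Option.some_injective _ this.symm)
    -- the deque step
    have hdq : pvStep ((t : Int) - w) (t : Int) v (pvRecs none (pvW hs w t).reverse)
        = pvRecs none (pvW hs w (t + 1)).reverse := by
      by_cases hcase : t < w.toNat
      · rw [pvW_succ_grow hs w t htl (by omega), hEt]
        simp only [Option.toList_some]
        rw [List.reverse_append, List.reverse_singleton, List.singleton_append]
        exact pvStep_grow _ _ _ _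
          (fun p hp => by
            have := pvW_mem_idx hs w t (by omega) (List.mem_reverse.1 hp)
            omega)
          (by omega)
      · rw [not_lt] at hcase
        have hne : pvW hs w t ≠ [] := by
          have := pvW_length hs w t (by omega)
          intro hc
          rw [hc] at this
          simp at this
          omega
        rw [pvW_succ_slide hs w t hw htl hcase, hEt]
        simp only [Option.toList_some]
        rw [List.reverse_append, List.reverse_singleton, List.singleton_append]
        have hWrev : (pvW hs w t).reverse = (pvW hs w t).tail.reverse ++ [(pvW hs w t).head hne] := by
          conv_lhs => rw [← List.cons_head_tail hne]
          rw [List.reverse_cons]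
        rw [hWrev]
        exact pvStep_slide _ _ _ _ _
          (fun p hp => by
            have := pvW_tail_idx hs w t (by omega) (List.mem_reverse.1 hp)
            omega)
          (by rw [pvW_head_idx hs w t (by omega) hne]; omega)
          (by omega)
    -- the fingerprint step
    rw [hdrop, cfAltLoop_cons, hdq]
    have hfps : (if w - 1 ≤ (t : Int) then
          (if (pvDedup (pvMins hs w t)).reverse = [] ∨
              ((pvDedup (pvMins hs w t)).reverse).head? ≠ some (((pvRecs none (pvW hs w (t + 1)).reverse).getLastD (0, 0)).2)
           then (((pvRecs none (pvW hs w (t + 1)).reverse).getLastD (0, 0)).2) :: (pvDedup (pvMins hs w t)).reverse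
           else (pvDedup (pvMins hs w t)).reverse)
         else (pvDedup (pvMins hs w t)).reverse)
        = (pvDedup (pvMins hs w (t + 1))).reverse := by
      by_cases hcond : w - 1 ≤ (t : Int)
      · rw [if_pos hcond]
        -- the window ending at t is nonempty
        have hne1 : pvW hs w (t + 1) ≠ [] := by
          have := pvW_length hs w (t + 1) (by omega)
          intro hc
          rw [hc] at this
          simp at this
          omega
        have hner : (pvW hs w (t + 1)).reverse ≠ [] := by
          simpa using hne1
        -- identify the reported minimum
        have hm : ((pvRecs none (pvW hs w (t + 1)).reverse).getLastD (0, 0)).2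
            = pvWinMin hs w t := by
          have h4 := pvRecs_getLast none (pvW hs w (t + 1)).reverse
          rw [pvRunMin_none_eq _ hner] at h4
          cases h5 : (pvRecs none (pvW hs w (t + 1)).reverse).getLast? with
          | none => rw [h5] at h4; simp at h4
          | some p =>
            rw [h5] at h4
            simp at h4
            rw [List.getLastD_eq_getLast?, h5]
            show p.2 = pvWinMin hs w t
            rw [h4, pvFold_reverse]
            rfl
        have hwt : w.toNat ≤ t + 1 := by omega
        rw [hm, pvMins_succ hs w t hw, if_pos hwt]
        have hded : pvDedup (pvMins hs w t ++ [pvWinMin hs w t])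
            = pvApp (pvDedup (pvMins hs w t)) (pvWinMin hs w t) := by
          unfold pvDedup
          rw [List.foldl_append]
          rfl
        rw [hded]
        exact pvRevApp _ _
      · rw [if_neg hcond, pvMins_succ hs w t hw, if_neg (by omega), List.append_nil]
    rw [hfps]
    exact ih (t + 1) (by omega)

-- ---- endpoints ----

theorem pvB_eq (hs : List Int) (w : Int) (hw : 1 ≤ w) :
    create_fingerprints_alt hs w = pvDedup (pvMins hs w hs.length) := by
  unfold create_fingerprints_alt
  have h0 := pvLoopInv hs w hw hs.length 0 (by omega)
  have hW0 : pvW hs w 0 = [] := by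
    unfold pvW
    simp
  have hM0 : pvMins hs w 0 = [] := by
    unfold pvMins
    rw [show 0 + 1 - w.toNat = 0 by omega]
    rfl
  rw [hW0, hM0] at h0
  simpa [pvE, pvDedup, pvRecs] using h0

theorem pvA_eq (hs : List Int) (w : Int) (hw : 1 ≤ w) :
    create_fingerprints hs w = pvDedup (pvMins hs w hs.length) := by
  unfold create_fingerprints
  rw [PySem.List.pyRange_one, List.foldl_map]
  have hK : ((hs.length : Int) - w + 1 - 0).toNat = hs.length + 1 - w.toNat := by omega
  rw [hK]
  unfold pvMins pvDedup
  rw [List.foldl_map]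
  apply PySem.List.foldl_congr_mem
  intro acc k hk
  have hkK : k < hs.length + 1 - w.toNat := List.mem_range.1 hk
  have hkn : k + w.toNat ≤ hs.length := by omega
  have hsl : PySem.List.slice hs (some ((0 : Int) + (k : Int))) (some ((0 : Int) + (k : Int) + w))
      = (hs.drop k).take w.toNat := by
    rw [PySem.List.slice_toNat hs (a := (0 : Int) + (k : Int)) (b := (0 : Int) + (k : Int) + w)
      (by omega) (by omega)]
    congr 1
    · omega
    · congr 1
      omega
  have hwin : pvWinMin hs w (w.toNat - 1 + k) = pvFold ((hs.drop k).take w.toNat) := by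
    unfold pvWinMin
    rw [pvW_map_snd, show w.toNat - 1 + k + 1 = w.toNat + k by omega,
      show w.toNat + k - w.toNat = k by omega, List.drop_take,
      show w.toNat + k - k = w.toNat by omega]
  cases hcase : (hs.drop k).take w.toNat with
  | nil =>
    exfalso
    have : ((hs.drop k).take w.toNat).length = 0 := by rw [hcase]; rfl
    rw [List.length_take, List.length_drop] at this
    omega
  | cons x r =>
    simp only [hsl, hcase, PySem.List.min?_id_cons]
    rw [hwin, hcase]
    rfl


-- ===== VERDICT (by name: the statement is the Claim_ definition above) =====
theorem create_fingerprints_spec : Claim_equal_create_fingerprints := by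
  intro hs w _hdom hpre
  unfold Spec_create_fingerprints
  rw [pvA_eq hs w hpre, pvB_eq hs w hpre]
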